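-- pv_equiv track=rewrite | github.com/joaobertacchi/coding_exercises | 6_heaps/schedule_tasks_on_min_machines/solution2.py | minimum_machines
-- ===== SOURCE A (Python) =====
-- from functools import cmp_to_key
--
-- def comparator(e1, e2):
--     if e1[0] < e2[0]:
--         return -1
--     elif e1[0] == e2[0]:
--         if e1[1] == 'end':
--             return -1
--         else:
--             return 1
--     else:
--         return 1
--
-- def minimum_machines(tasks):
--     events = []
--     for t in tasks:
--         events.append([t[0], 'start'])
--         events.append([t[1], 'end'])
--
--     events.sort(key=cmp_to_key(comparator))
--
--     max_machines = 0
--     counter = 0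
--     for e in events:
--         if e[1] == 'start':
--             counter += 1
--         else:
--             counter -= 1
--         max_machines = max(counter, max_machines)
--
--     return max_machines
-- ===== SOURCE B (Python) =====
-- def minimum_machines(tasks):
--     starts = sorted(t[0] for t in tasks)
--     ends = sorted(t[1] for t in tasks)
--     n = len(starts)
--     i = j = 0
--     count = best = 0
--     while i < n:
--         if j >= n or starts[i] < ends[j]:
--             count += 1
--             i += 1
--             if count > best:
--                 best = count
--         else:
--             count -= 1
--             j += 1
--     return best
-- ===== Notes on version B (the rewrite author's own statement) =====
-- stated objective: idiomatic
-- what changed: Instead of building a single event list with string tags and sorting it with a custom cmp_to_key comparator, B sorts the start times and end times into two separate plain-sorted arrays and sweeps them with a two-pointer merge (strict '<' so an end at the same instant is processed first), keeping a running counter and maximum.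
import Mathlib
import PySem

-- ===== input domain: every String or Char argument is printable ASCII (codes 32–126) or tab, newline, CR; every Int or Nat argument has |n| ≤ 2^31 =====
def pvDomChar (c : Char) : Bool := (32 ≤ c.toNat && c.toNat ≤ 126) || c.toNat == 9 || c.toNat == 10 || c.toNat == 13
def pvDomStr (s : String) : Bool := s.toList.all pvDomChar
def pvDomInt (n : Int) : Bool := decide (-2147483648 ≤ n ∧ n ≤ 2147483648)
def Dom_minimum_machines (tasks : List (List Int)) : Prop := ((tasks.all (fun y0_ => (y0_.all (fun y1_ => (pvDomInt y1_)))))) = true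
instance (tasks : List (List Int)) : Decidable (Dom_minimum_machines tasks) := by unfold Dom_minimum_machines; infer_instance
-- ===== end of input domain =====

-- B replaces A's tagged-event sort with a custom comparator by a two-pointer merge over the
-- separately sorted start and end times (idiomatic; same asymptotic cost).

-- ===== PORT A =====
-- comparator(e1, e2) from Source A; events are (time, label) pairs (the Python list [t, 'start'])
def comparator (e1 e2 : Int × String) : Int :=
  if e1.1 < e2.1 then -1
  else if e1.1 = e2.1 then (if e1.2 = "end" then -1 else 1)
  else 1

-- the events-building loop; t[0] / t[1] via pyGet? (Pre_ guarantees they exist, so getD 0 never fires)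
def buildEvents : List (List Int) → List (Int × String)
  | [] => []
  | t :: ts => ((PySem.List.pyGet? t 0).getD 0, "start") ::
               ((PySem.List.pyGet? t 1).getD 0, "end") :: buildEvents ts

-- events.sort(key=cmp_to_key(comparator)): a comparison sort driven by the SAME comparator
-- (insertion sort; the comparator is inconsistent on ties, so CPython's order among equal-key
-- events may differ from this one, but equal-key events are interchangeable for the sweep below,
-- so the returned value is CPython's on every input)
def insertCmp (x : Int × String) : List (Int × String) → List (Int × String)
  | [] => [x]
  | y :: ys => if comparator x y < 0 then x :: y :: ys else y :: insertCmp x ys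

def sortCmp : List (Int × String) → List (Int × String)
  | [] => []
  | x :: xs => insertCmp x (sortCmp xs)

-- the counting loop: state (counter, max_machines), max updated after every event
def sweepA : List (Int × String) → Int × Int → Int × Int
  | [], st => st
  | e :: es, (c, m) =>
    let c' := if e.2 = "start" then c + 1 else c - 1
    sweepA es (c', max c' m)

def minimum_machines (tasks : List (List Int)) : Int :=
  (sweepA (sortCmp (buildEvents tasks)) (0, 0)).2

-- ===== PORT B =====
-- the while-loop of Source B: i/j pointers become structural recursion on the two sorted lists
def walkB : List Int → List Int → Int → Int → Int
  | [], _, _, best => best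
  | _ :: ss, [], c, best => walkB ss [] (c + 1) (if c + 1 > best then c + 1 else best)
  | s :: ss, e :: es, c, best =>
    if s < e then walkB ss (e :: es) (c + 1) (if c + 1 > best then c + 1 else best)
    else walkB (s :: ss) es (c - 1) best
termination_by ss es => ss.length + es.length

def minimum_machines_alt (tasks : List (List Int)) : Int :=
  walkB (PySem.List.sorted (tasks.map fun t => (PySem.List.pyGet? t 0).getD 0) (fun x => x) false)
        (PySem.List.sorted (tasks.map fun t => (PySem.List.pyGet? t 1).getD 0) (fun x => x) false)
        0 0

-- ===== PRECONDITION & SPEC =====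
-- A indexes t[0] and t[1] of every task: a task with fewer than 2 entries raises IndexError
-- (in B's generator expressions as well), so exactly those inputs are excluded.
def Pre_minimum_machines (tasks : List (List Int)) : Prop := ∀ t ∈ tasks, 2 ≤ t.length
instance (tasks : List (List Int)) : Decidable (Pre_minimum_machines tasks) := by
  unfold Pre_minimum_machines; infer_instance

def pvWitness_minimum_machines : List (List Int) := [[0, 3], [2, 5], [4, 4]]

def Spec_minimum_machines (tasks : List (List Int)) (out : Int) : Prop := out = minimum_machines_alt tasks
instance (tasks : List (List Int)) (out : Int) : Decidable (Spec_minimum_machines tasks out) := by unfold Spec_minimum_machines; infer_instance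

-- ===== CLAIM (what is proved, stated in full; the proofs are below) =====
def Claim_equal_minimum_machines : Prop := ∀ (tasks : List (List Int)), Dom_minimum_machines tasks → Pre_minimum_machines tasks → Spec_minimum_machines tasks (minimum_machines tasks)

-- ===== LEMMAS AND PROOFS =====

-- key of an event: (time, 1) for a start, (time, 0) for anything else ("end" here)
def kOf (e : Int × String) : Int × Int := (e.1, if e.2 = "start" then 1 else 0)

-- the order the comparator realises, at key level (lexicographic ≤ on (time, rank))
def leK (p q : Int × Int) : Prop := p.1 < q.1 ∨ (p.1 = q.1 ∧ p.2 ≤ q.2)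

-- key-level copies of the two sweeps
def kA : List (Int × Int) → Int × Int → Int × Int
  | [], st => st
  | k :: ks, (c, m) =>
    let c' := if k.2 = 1 then c + 1 else c - 1
    kA ks (c', max c' m)

def kB : List (Int × Int) → Int × Int → Int × Int
  | [], st => st
  | k :: ks, (c, m) =>
    if k.2 = 1 then kB ks (c + 1, if c + 1 > m then c + 1 else m) else kB ks (c - 1, m)

-- the key sequence B's two-pointer walk consumes
def mergeK : List Int → List Int → List (Int × Int)
  | [], es => es.map (fun e => (e, 0))
  | s :: ss, [] => (s, 1) :: mergeK ss []
  | s :: ss, e :: es =>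
    if s < e then (s, 1) :: mergeK ss (e :: es) else (e, 0) :: mergeK (s :: ss) es
termination_by ss es => ss.length + es.length

lemma leK_trans {p q r : Int × Int} (h1 : leK p q) (h2 : leK q r) : leK p r := by
  unfold leK at *; omega

lemma leK_antisymm {p q : Int × Int} (h1 : leK p q) (h2 : leK q p) : p = q := by
  unfold leK at *
  have : p.1 = q.1 ∧ p.2 = q.2 := by omega
  exact Prod.ext this.1 this.2

-- A's sweep only looks at the key of each event
lemma sweepA_eq_kA (l : List (Int × String)) (st : Int × Int) :
    sweepA l st = kA (l.map kOf) st := by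
  induction l generalizing st with
  | nil => rfl
  | cons e es ih =>
    obtain ⟨c, m⟩ := st
    by_cases h : e.2 = "start" <;> simp [sweepA, kA, kOf, h, ih]

-- ends alone never change kB's max component
lemma kB_ends (es : List Int) (c m : Int) :
    kB (es.map (fun e => (e, 0))) (c, m) = (c - es.length, m) := by
  induction es generalizing c with
  | nil => simp [kB]
  | cons e es ih => simp [kB, ih]; ring

-- B's walk is the key sweep kB over mergeK
lemma walkB_eq_kB (ss es : List Int) (c m : Int) :
    walkB ss es c m = (kB (mergeK ss es) (c, m)).2 := by
  induction ss, es using mergeK.induct generalizing c m with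
  | case1 es => simp [walkB, mergeK, kB_ends]
  | case2 s ss ih => simp [walkB, mergeK, kB, ih]
  | case3 s ss e es h ih => simp [walkB, mergeK, kB, h, ih]
  | case4 s ss e es h ih => simp [walkB, mergeK, kB, h, ih]

-- with counter ≤ max the two sweeps keep identical state
lemma kA_eq_kB (l : List (Int × Int)) (c m : Int) (h : c ≤ m) :
    kA l (c, m) = kB l (c, m) := by
  induction l generalizing c m with
  | nil => rfl
  | cons k ks ih =>
    by_cases hk : k.2 = 1
    · have hmax : max (c + 1) m = if c + 1 > m then c + 1 else m := by omega
      simp only [kA, kB, hk, if_pos]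
      rw [hmax, ih (c + 1) (if c + 1 > m then c + 1 else m) (by omega)]
    · have hmax : max (c - 1) m = m := by omega
      simp only [kA, kB, hk, if_false]
      rw [hmax, ih (c - 1) m (by omega)]

lemma insertCmp_perm (x : Int × String) (l : List (Int × String)) :
    (insertCmp x l).Perm (x :: l) := by
  induction l with
  | nil => rfl
  | cons y ys ih =>
    simp only [insertCmp]
    split
    · rfl
    · exact (ih.cons y).trans (List.Perm.swap x y ys)

lemma sortCmp_perm (l : List (Int × String)) : (sortCmp l).Perm l := by
  induction l with
  | nil => rfl
  | cons x xs ih => exact (insertCmp_perm x (sortCmp xs)).trans (ih.cons x)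

-- comparator decisions at key level
lemma comparator_lt {x y : Int × String} (h : comparator x y < 0) : leK (kOf x) (kOf y) := by
  unfold comparator at h
  unfold leK kOf
  split_ifs at h with h1 h2 h3 <;> (simp_all; try omega)

lemma comparator_ge {x y : Int × String} (h : ¬ comparator x y < 0)
    (hx : x.2 = "start" ∨ x.2 = "end") : leK (kOf y) (kOf x) := by
  unfold comparator at h
  unfold leK kOf
  split_ifs at h with h1 h2 h3 <;> rcases hx with hx | hx <;> simp_all <;> omega

-- the event relation the sorted list satisfies
def RE (e f : Int × String) : Prop := leK (kOf e) (kOf f)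

lemma pairwise_insertCmp (x : Int × String) (l : List (Int × String))
    (hx : x.2 = "start" ∨ x.2 = "end") (hl : l.Pairwise RE) :
    (insertCmp x l).Pairwise RE := by
  induction l with
  | nil => simp [insertCmp]
  | cons y ys ih =>
    rcases List.pairwise_cons.mp hl with ⟨hy, hys⟩
    simp only [insertCmp]
    split
    · refine List.pairwise_cons.mpr ⟨?_, hl⟩
      intro z hz
      rcases List.mem_cons.mp hz with rfl | hz
      · exact comparator_lt (by assumption)
      · exact leK_trans (comparator_lt (by assumption)) (hy z hz)
    · refine List.pairwise_cons.mpr ⟨?_, ih hys⟩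
      intro z hz
      have : z = x ∨ z ∈ ys := by
        have := (insertCmp_perm x ys).mem_iff.mp hz
        simpa using this
      rcases this with rfl | hz'
      · exact comparator_ge (by assumption) hx
      · exact hy z hz'

lemma labels_buildEvents (ts : List (List Int)) :
    ∀ e ∈ buildEvents ts, e.2 = "start" ∨ e.2 = "end" := by
  induction ts with
  | nil => simp [buildEvents]
  | cons t ts ih =>
    intro e he
    simp only [buildEvents, List.mem_cons] at he
    rcases he with rfl | rfl | he
    · left; rfl
    · right; rfl
    · exact ih e he

lemma pairwise_sortCmp (l : List (Int × String))
    (hl : ∀ e ∈ l, e.2 = "start" ∨ e.2 = "end") : (sortCmp l).Pairwise RE := by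
  induction l with
  | nil => simp [sortCmp]
  | cons x xs ih =>
    exact pairwise_insertCmp x (sortCmp xs) (hl x (by simp))
      (ih fun e he => hl e (List.mem_cons_of_mem x he))

-- multiset content of the key lists
lemma buildEvents_keys_perm (ts : List (List Int)) :
    ((buildEvents ts).map kOf).Perm
      (((ts.map fun t => (PySem.List.pyGet? t 0).getD 0).map fun s => (s, 1)) ++
       ((ts.map fun t => (PySem.List.pyGet? t 1).getD 0).map fun e => (e, 0))) := by
  induction ts with
  | nil => rfl
  | cons t ts ih =>
    simp only [buildEvents, List.map_cons, kOf]
    refine List.Perm.cons _ ?_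
    exact (ih.cons _).trans List.perm_middle.symm

lemma mergeK_perm (ss es : List Int) :
    (mergeK ss es).Perm ((ss.map fun s => (s, 1)) ++ (es.map fun e => (e, 0))) := by
  induction ss, es using mergeK.induct with
  | case1 es => simp [mergeK]
  | case2 s ss ih => simpa [mergeK] using ih.cons (s, 1)
  | case3 s ss e es h ih => simpa [mergeK, h] using ih.cons (s, 1)
  | case4 s ss e es h ih =>
    simp only [mergeK, if_neg h]
    exact (ih.cons (e, 0)).trans List.perm_middle.symm

-- mergeK of two sorted lists is leK-sorted
lemma mem_mergeK {z : Int × Int} {ss es : List Int} (hz : z ∈ mergeK ss es) :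
    (z.2 = 1 ∧ z.1 ∈ ss) ∨ (z.2 = 0 ∧ z.1 ∈ es) := by
  have := (mergeK_perm ss es).mem_iff.mp hz
  simp only [List.mem_append, List.mem_map] at this
  rcases this with ⟨s, hs, rfl⟩ | ⟨e, he, rfl⟩
  · exact Or.inl ⟨rfl, hs⟩
  · exact Or.inr ⟨rfl, he⟩

lemma pairwise_mergeK (ss es : List Int)
    (hs : ss.Pairwise (· ≤ ·)) (he : es.Pairwise (· ≤ ·)) :
    (mergeK ss es).Pairwise leK := by
  induction ss, es using mergeK.induct with
  | case1 es =>
    simp only [mergeK]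
    refine List.pairwise_map.mpr (he.imp ?_)
    intro a b hab; unfold leK; simp; omega
  | case2 s ss ih =>
    rcases List.pairwise_cons.mp hs with ⟨hhd, htl⟩
    simp only [mergeK]
    refine List.pairwise_cons.mpr ⟨?_, ih htl he⟩
    intro z hz
    rcases mem_mergeK hz with ⟨h1, h2⟩ | ⟨h1, h2⟩
    · have := hhd _ h2; unfold leK; omega
    · simp at h2
  | case3 s ss e es h ih =>
    rcases List.pairwise_cons.mp hs with ⟨hhd, htl⟩
    simp only [mergeK, if_pos h]
    refine List.pairwise_cons.mpr ⟨?_, ih htl he⟩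
    intro z hz
    rcases mem_mergeK hz with ⟨h1, h2⟩ | ⟨h1, h2⟩
    · have := hhd _ h2; unfold leK; omega
    · rcases List.mem_cons.mp h2 with rfl | h2'
      · unfold leK; omega
      · have : e ≤ z.1 := (List.pairwise_cons.mp he).1 _ h2'
        unfold leK; omega
  | case4 s ss e es h ih =>
    rcases List.pairwise_cons.mp he with ⟨hhd, htl⟩
    simp only [mergeK, if_neg h]
    refine List.pairwise_cons.mpr ⟨?_, ih hs htl⟩
    intro z hz
    rcases mem_mergeK hz with ⟨h1, h2⟩ | ⟨h1, h2⟩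
    · rcases List.mem_cons.mp h2 with rfl | h2'
      · unfold leK; omega
      · have : s ≤ z.1 := (List.pairwise_cons.mp hs).1 _ h2'
        unfold leK; omega
    · have := hhd _ h2; unfold leK; omega

-- two leK-sorted permutations of the same keys are equal lists
lemma sorted_perm_eq : ∀ {l1 l2 : List (Int × Int)}, l1.Perm l2 →
    l1.Pairwise leK → l2.Pairwise leK → l1 = l2 := by
  intro l1
  induction l1 with
  | nil =>
    intro l2 hp _ _
    exact (hp.nil_eq).symm ▸ rfl
  | cons a t1 ih =>
    intro l2 hp h1 h2
    cases l2 with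
    | nil => exact absurd hp.symm.nil_eq (by simp)
    | cons b t2 =>
      have hab : a = b := by
        have ha : a ∈ b :: t2 := hp.mem_iff.mp (by simp)
        have hb : b ∈ a :: t1 := hp.symm.mem_iff.mp (by simp)
        rcases List.mem_cons.mp ha with rfl | ha'
        · rfl
        · rcases List.mem_cons.mp hb with rfl | hb'
          · rfl
          · exact leK_antisymm ((List.pairwise_cons.mp h1).1 _ hb')
              ((List.pairwise_cons.mp h2).1 _ ha')
      subst hab
      have := ih (hp.cons_inv) (List.pairwise_cons.mp h1).2 (List.pairwise_cons.mp h2).2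
      rw [this]

-- ===== VERDICT (by name: the statement is the Claim_ definition above) =====
theorem minimum_machines_spec : Claim_equal_minimum_machines := by
  intro tasks _ _
  unfold Spec_minimum_machines minimum_machines minimum_machines_alt
  set g0 := fun t : List Int => (PySem.List.pyGet? t 0).getD 0 with hg0
  set g1 := fun t : List Int => (PySem.List.pyGet? t 1).getD 0 with hg1
  set S := PySem.List.sorted (tasks.map g0) (fun x => x) false with hS
  set E := PySem.List.sorted (tasks.map g1) (fun x => x) false with hE
  have hkeys : (sortCmp (buildEvents tasks)).map kOf = mergeK S E := by
    apply sorted_perm_eq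
    · refine (((sortCmp_perm _).map kOf).trans (buildEvents_keys_perm tasks)).trans ?_
      refine ((List.Perm.append ((PySem.List.sorted_perm _ _ _).map _).symm
        ((PySem.List.sorted_perm _ _ _).map _).symm).trans (mergeK_perm S E).symm)
    · exact List.pairwise_map.mpr (pairwise_sortCmp _ (labels_buildEvents tasks))
    · exact pairwise_mergeK S E (PySem.List.sorted_pairwise _ _) (PySem.List.sorted_pairwise _ _)
  rw [walkB_eq_kB, sweepA_eq_kA, hkeys, kA_eq_kB _ 0 0 le_rfl]
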